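-- pv_equiv track=rewrite | github.com/martonz/GCC-Dashboard | worker/app/alerting/discord.py | _join_complete_lines_with_limit
-- ===== SOURCE A (Python) =====
-- def _join_complete_lines_with_limit(lines: list[str], max_len: int) -> str:
--     """Join only full lines without cutting links/text mid-line."""
--     out: list[str] = []
--     used = 0
--     for line in lines:
--         add_len = len(line) if not out else len(line) + 1  # account for newlines
--         if used + add_len > max_len:
--             if out:
--                 out.append("...")
--             break
--         out.append(line)
--         used += add_len
--     return "\n".join(out)
-- ===== SOURCE B (Python) =====
-- def _join_complete_lines_with_limit(lines: list[str], max_len: int) -> str: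
--     """Join only full lines without cutting links/text mid-line."""
--     # prefix-sum table of joined length after each line (newline cost for all but the first)
--     cum = []
--     total = 0
--     for i, line in enumerate(lines):
--         total += len(line) + (1 if i else 0)
--         cum.append(total)
--     # binary search: k = number of leading lines whose joined length fits
--     lo, hi = 0, len(cum)
--     while lo < hi:
--         mid = (lo + hi) // 2
--         if cum[mid] <= max_len:
--             lo = mid + 1
--         else:
--             hi = mid
--     k = lo
--     kept = lines[:k]
--     if 0 < k < len(lines):
--         kept = kept + ["..."]
--     return "\n".join(kept)
-- ===== Notes on version B (the rewrite author's own statement) =====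
-- stated objective: alternative
-- what changed: Replaces the greedy accumulate-and-break loop by a prefix-sum table of joined lengths plus a binary search for the cutoff k, then slices lines[:k] and appends the ellipsis when truncation occurred.
import Mathlib
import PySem

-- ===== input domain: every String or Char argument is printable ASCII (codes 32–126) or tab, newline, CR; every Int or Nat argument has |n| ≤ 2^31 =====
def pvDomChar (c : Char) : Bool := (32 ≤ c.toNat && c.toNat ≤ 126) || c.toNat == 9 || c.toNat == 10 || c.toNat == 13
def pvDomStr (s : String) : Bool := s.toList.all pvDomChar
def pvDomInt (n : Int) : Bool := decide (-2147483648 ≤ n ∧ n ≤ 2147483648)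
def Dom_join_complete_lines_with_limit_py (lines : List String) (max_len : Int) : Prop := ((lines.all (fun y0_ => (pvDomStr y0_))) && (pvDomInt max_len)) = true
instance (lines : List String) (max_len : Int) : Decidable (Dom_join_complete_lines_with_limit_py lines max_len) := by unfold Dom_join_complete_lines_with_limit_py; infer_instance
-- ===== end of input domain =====

-- B replaces A's greedy accumulate-and-break loop by a prefix-sum table of joined
-- lengths plus a binary search for the cutoff; same cost, different decomposition.

-- ===== PORT A =====
-- the for-loop of A, state (out, used); the 'break' is the non-recursive branch
def pvLoopA (max_len : Int) : List String → List String → Int → List String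
  | [], out, _ => out
  | line :: rest, out, used =>
    let add_len : Int := if out = [] then PySem.Str.len line else PySem.Str.len line + 1
    if used + add_len > max_len then
      (if out = [] then out else out ++ ["..."])
    else pvLoopA max_len rest (out ++ [line]) (used + add_len)

def join_complete_lines_with_limit_py (lines : List String) (max_len : Int) : String :=
  PySem.Str.join "\n" (pvLoopA max_len lines [] 0)

-- ===== PORT B =====
-- Source B's first loop: the prefix-sum table 'cum' (enumerate index i, running total)
def pvCum : List String → Nat → Int → List Int
  | [], _, _ => []
  | line :: rest, i, total =>
    let total' := total + PySem.Str.len line + (if i = 0 then 0 else 1)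
    total' :: pvCum rest (i + 1) total'

-- Source B's while-loop binary search (cum[mid] is always in range, ported as getD)
def pvBsearch (cum : List Int) (max_len : Int) (lo hi : Nat) : Nat :=
  if _h : lo < hi then
    let mid := (lo + hi) / 2
    if cum.getD mid 0 ≤ max_len then pvBsearch cum max_len (mid + 1) hi
    else pvBsearch cum max_len lo mid
  else lo
termination_by hi - lo
decreasing_by all_goals omega

def join_complete_lines_with_limit_py_alt (lines : List String) (max_len : Int) : String :=
  let cum := pvCum lines 0 0
  let k := pvBsearch cum max_len 0 cum.length
  let kept := lines.take k
  let kept := if 0 < k ∧ k < lines.length then kept ++ ["..."] else kept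
  PySem.Str.join "\n" kept

-- ===== PRECONDITION & SPEC =====
def Spec_join_complete_lines_with_limit_py (lines : List String) (max_len : Int) (out : String) : Prop := out = join_complete_lines_with_limit_py_alt lines max_len
instance (lines : List String) (max_len : Int) (out : String) : Decidable (Spec_join_complete_lines_with_limit_py lines max_len out) := by unfold Spec_join_complete_lines_with_limit_py; infer_instance

-- ===== CLAIM (what is proved, stated in full; the proofs are below) =====
def Claim_equal_join_complete_lines_with_limit_py : Prop := ∀ (lines : List String) (max_len : Int), Dom_join_complete_lines_with_limit_py lines max_len → Spec_join_complete_lines_with_limit_py lines max_len (join_complete_lines_with_limit_py lines max_len)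

-- ===== LEMMAS AND PROOFS =====

-- the suffix A's loop appends after 'out'; flag b = "out is nonempty"
def pvG (m : Int) : List String → Int → Bool → List String
  | [], _, _ => []
  | l :: r, u, b =>
    let a : Int := if b then PySem.Str.len l + 1 else PySem.Str.len l
    if u + a > m then (if b then ["..."] else []) else l :: pvG m r (u + a) true

-- the number of lines A's loop keeps
def pvK (m : Int) : List String → Int → Bool → Nat
  | [], _, _ => 0
  | l :: r, u, b =>
    let a : Int := if b then PySem.Str.len l + 1 else PySem.Str.len l
    if u + a > m then 0 else 1 + pvK m r (u + a) true

theorem pvLoopA_eq_g (m : Int) : ∀ (rest out : List String) (used : Int),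
    pvLoopA m rest out used = out ++ pvG m rest used (decide (out ≠ [])) := by
  intro rest
  induction rest with
  | nil => intro out used; simp [pvLoopA, pvG]
  | cons l r ih =>
    intro out used
    by_cases hout : out = []
    · subst hout
      have hb : (decide (([] : List String) ≠ [])) = false := by decide
      rw [hb]
      simp only [pvLoopA, pvG, List.nil_append, Bool.false_eq_true, if_false]
      split_ifs <;> first | rfl | (rw [ih]; simp)
    · have hb : (decide (out ≠ [])) = true := by simpa using hout
      rw [hb]
      simp only [pvLoopA, pvG, if_neg hout]
      split_ifs with h
      · simp
      · rw [ih]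
        have hb2 : (decide ((out ++ [l]) ≠ [])) = true := by simp
        rw [hb2]
        simp

theorem pvG_eq_take (m : Int) : ∀ (rest : List String) (u : Int) (b : Bool),
    pvG m rest u b = rest.take (pvK m rest u b) ++
      (if (b = true ∨ 0 < pvK m rest u b) ∧ pvK m rest u b < rest.length then ["..."] else []) := by
  intro rest
  induction rest with
  | nil => intro u b; simp [pvG, pvK]
  | cons l r ih =>
    intro u b
    simp only [pvG, pvK]
    by_cases h : u + (if b = true then PySem.Str.len l + 1 else PySem.Str.len l) > m
    · simp only [if_pos h]
      cases b <;> simp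
    · simp only [if_neg h]
      rw [ih _ true, Nat.add_comm 1, List.take_succ_cons]
      simp

theorem pvK_eq_takeWhile (m : Int) : ∀ (rest : List String) (i : Nat) (u : Int),
    pvK m rest u (decide (i ≠ 0)) = ((pvCum rest i u).takeWhile (fun c => decide (c ≤ m))).length := by
  intro rest
  induction rest with
  | nil => intro i u; simp [pvK, pvCum]
  | cons l r ih =>
    intro i u
    simp only [pvK, pvCum, List.takeWhile]
    have ha : (u + if (decide (i ≠ 0)) = true then PySem.Str.len l + 1 else PySem.Str.len l)
        = u + PySem.Str.len l + (if i = 0 then 0 else 1) := by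
      by_cases hi : i = 0
      · simp [hi]
      · simp [hi]; ring
    rw [ha]
    by_cases h : u + PySem.Str.len l + (if i = 0 then 0 else 1) > m
    · have hd : (decide ((u + PySem.Str.len l + (if i = 0 then 0 else 1)) ≤ m)) = false := by
        simp only [decide_eq_false_iff_not, not_le]; omega
      simp only [if_pos h, hd, List.length_nil]
    · have hd : (decide ((u + PySem.Str.len l + (if i = 0 then 0 else 1)) ≤ m)) = true := by
        simp only [decide_eq_true_eq]; omega
      simp only [if_neg h, hd, List.length_cons]
      have hrec := ih (i + 1) (u + PySem.Str.len l + (if i = 0 then 0 else 1))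
      have hb1 : (decide ((i + 1) ≠ 0)) = true := by simp
      rw [hb1] at hrec
      rw [hrec]
      omega

theorem pvCum_mono : ∀ (rest : List String) (i : Nat) (u : Int),
    List.Pairwise (· ≤ ·) (pvCum rest i u) ∧ ∀ x ∈ pvCum rest i u, u ≤ x := by
  intro rest
  induction rest with
  | nil => intro i u; simp [pvCum]
  | cons l r ih =>
    intro i u
    simp only [pvCum, List.pairwise_cons, List.mem_cons]
    have hlen : (0 : Int) ≤ PySem.Str.len l := by
      rw [PySem.Str.len_eq]; positivity
    have hstep : u ≤ u + PySem.Str.len l + (if i = 0 then 0 else 1) := by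
      split_ifs <;> omega
    obtain ⟨hp, hmem⟩ := ih (i + 1) (u + PySem.Str.len l + (if i = 0 then 0 else 1))
    refine ⟨⟨fun x hx => hmem x hx, hp⟩, ?_⟩
    rintro x (rfl | hx)
    · exact hstep
    · exact le_trans hstep (hmem x hx)

-- takeWhile facts on a monotone list
theorem takeWhile_getElem_pos {l : List Int} (p : Int → Bool) {j : Nat}
    (hj : j < (l.takeWhile p).length) (hjl : j < l.length) : p (l[j]) = true := by
  have hpre := List.takeWhile_prefix (l := l) (p := p)
  have : l[j] = (l.takeWhile p)[j] := (List.IsPrefix.getElem hpre hj).symm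
  rw [this]
  exact List.mem_takeWhile_imp (List.getElem_mem hj)

theorem takeWhile_getElem_stop {l : List Int} (p : Int → Bool)
    (h : (l.takeWhile p).length < l.length) :
    p (l[(l.takeWhile p).length]) = false := by
  induction l with
  | nil => simp at h
  | cons x xs ih =>
    by_cases hx : p x
    · simp only [List.takeWhile, hx, List.length_cons] at h ⊢
      simpa using ih (by simpa using h)
    · simp [List.takeWhile, hx]

theorem pvBsearch_char (cum : List Int) (m : Int) (K : Nat)
    (hK1 : ∀ j (_ : j < cum.length), j < K → cum[j] ≤ m)
    (hK2 : ∀ j (_ : j < cum.length), K ≤ j → m < cum[j]) :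
    ∀ (lo hi : Nat), lo ≤ K → K ≤ hi → hi ≤ cum.length → pvBsearch cum m lo hi = K := by
  intro lo hi
  induction hn : hi - lo using Nat.strong_induction_on generalizing lo hi with
  | _ n ihn =>
  intro hloK hKhi hhilen
  rw [pvBsearch]
  by_cases h : lo < hi
  · simp only [h, dif_pos]
    have hmidlt : (lo + hi) / 2 < hi := by omega
    have hmidge : lo ≤ (lo + hi) / 2 := by omega
    have hmidlen : (lo + hi) / 2 < cum.length := by omega
    have hget : cum.getD ((lo + hi) / 2) 0 = cum[(lo + hi) / 2] :=
      List.getD_eq_getElem cum 0 hmidlen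
    rw [hget]
    by_cases hc : cum[(lo + hi) / 2] ≤ m
    · simp only [hc, if_pos]
      have hmidK : (lo + hi) / 2 < K := by
        rcases Nat.lt_or_ge ((lo + hi) / 2) K with hlt | hge
        · exact hlt
        · exact absurd (hK2 _ hmidlen hge) (by omega)
      exact ihn (hi - ((lo + hi) / 2 + 1)) (by omega) _ _ rfl (by omega) (by omega) (by omega)
    · simp only [hc, if_false]
      have hKmid : K ≤ (lo + hi) / 2 := by
        rcases Nat.lt_or_ge ((lo + hi) / 2) K with hlt | hge
        · exact absurd (hK1 _ hmidlen hlt) hc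
        · exact hge
      exact ihn ((lo + hi) / 2 - lo) (by omega) _ _ rfl (by omega) (by omega) (by omega)
  · simp only [h, dif_neg, not_false_iff]
    omega

theorem pvBsearch_eq_takeWhile (cum : List Int) (m : Int)
    (hmono : List.Pairwise (· ≤ ·) cum) :
    pvBsearch cum m 0 cum.length = (cum.takeWhile (fun c => decide (c ≤ m))).length := by
  have hKlen : (cum.takeWhile (fun c => decide (c ≤ m))).length ≤ cum.length :=
    (List.takeWhile_prefix _).length_le
  apply pvBsearch_char
  · intro j hj hjK
    have := takeWhile_getElem_pos (l := cum) (fun c => decide (c ≤ m)) (by omega) hj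
    simpa using this
  · intro j hj hKj
    have hKlt : (cum.takeWhile (fun c => decide (c ≤ m))).length < cum.length := by omega
    have hstop := takeWhile_getElem_stop (l := cum) (fun c => decide (c ≤ m)) hKlt
    simp only [decide_eq_false_iff_not, not_le] at hstop
    rcases Nat.lt_or_ge (cum.takeWhile (fun c => decide (c ≤ m))).length j with hlt | hge
    · exact lt_of_lt_of_le hstop (List.pairwise_iff_getElem.mp hmono _ _ hKlt hj hlt)
    · have : (cum.takeWhile (fun c => decide (c ≤ m))).length = j := by omega
      subst this
      exact hstop
  · exact Nat.zero_le _
  · exact hKlen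
  · exact le_rfl

-- ===== VERDICT (by name: the statement is the Claim_ definition above) =====
theorem join_complete_lines_with_limit_py_spec : Claim_equal_join_complete_lines_with_limit_py := by
  intro lines max_len _hdom
  unfold Spec_join_complete_lines_with_limit_py
  simp only [join_complete_lines_with_limit_py, join_complete_lines_with_limit_py_alt]
  have hmono := (pvCum_mono lines 0 0).1
  have hbs := pvBsearch_eq_takeWhile (pvCum lines 0 0) max_len hmono
  have hk := pvK_eq_takeWhile max_len lines 0 0
  have hdec : (decide ((0 : Nat) ≠ 0)) = false := by decide
  rw [hdec] at hk
  have hA := pvLoopA_eq_g max_len lines [] 0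
  have hdec2 : (decide (([] : List String) ≠ [])) = false := by decide
  rw [hdec2] at hA
  rw [hA, List.nil_append, pvG_eq_take, hk]
  rw [hbs]
  congr 1
  by_cases hcond : 0 < (List.takeWhile (fun c => decide (c ≤ max_len)) (pvCum lines 0 0)).length ∧
      (List.takeWhile (fun c => decide (c ≤ max_len)) (pvCum lines 0 0)).length < lines.length
  · simp [hcond]
  · simp [hcond]
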